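-- pv_equiv track=rewrite | github.com/adorahelen/Exam-Preparation | src/test/prob6.py | solution
-- ===== SOURCE A (Python) =====
-- def solution(n, k):
--     limit = 1000000007
--     memo = {}
--
--     def ways(jump, position, last):
--         if jump == k:
--             return 1 if position == n else 0
--
--         if position > n :
--             return 0
--
--         key = (jump, position, last)
--         if key in memo:
--             return memo[key]
--
--         total_ways = 0
--
--         for jump_distance in range(1, last):
--             total_ways += ways(jump +1, position + jump_distance, jump_distance)
--             total_ways %= limit
--
--         memo[key] = total_ways
--         return total_ways
--
--     return ways(0, 0, n + 1)
-- ===== SOURCE B (Python) =====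
-- def solution(n, k):
--     # Binary include/exclude recurrence on the largest allowed jump instead of
--     # A's inner summation loop: q(r, m, l) = (# mod p) of strictly decreasing
--     # sequences of r positive jumps, all < l, summing to m.
--     p = 1000000007
--     memo = {}
--
--     def q(r, m, l):
--         if r == 0:
--             return 1 if m == 0 else 0
--         if m < 0:
--             return 0
--         if l <= 1:
--             return 0
--         key = (r, m, l)
--         if key not in memo:
--             # either the value l-1 is the (unique, largest) jump used, or not
--             memo[key] = (q(r, m, l - 1) + q(r - 1, m - (l - 1), l - 1)) % p
--         return memo[key]
--
--     return q(k, n, n + 1)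
-- ===== Notes on version B (the rewrite author's own statement) =====
-- stated objective: faster
-- what changed: B replaces A's inner loop that sums over every possible next jump distance by a binary include/exclude recurrence on the largest allowed jump value (use l-1 as a jump or lower the bound), so each memoized state costs O(1) instead of O(n).
import Mathlib
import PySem

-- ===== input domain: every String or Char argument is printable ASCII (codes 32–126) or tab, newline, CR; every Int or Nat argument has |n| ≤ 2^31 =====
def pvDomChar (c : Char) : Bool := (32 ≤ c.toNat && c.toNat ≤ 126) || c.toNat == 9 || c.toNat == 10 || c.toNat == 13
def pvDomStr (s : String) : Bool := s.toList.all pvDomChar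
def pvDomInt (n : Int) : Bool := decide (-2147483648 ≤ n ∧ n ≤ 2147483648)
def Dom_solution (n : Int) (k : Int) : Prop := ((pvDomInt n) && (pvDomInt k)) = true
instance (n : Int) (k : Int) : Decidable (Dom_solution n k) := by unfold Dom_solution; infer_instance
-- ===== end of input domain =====

-- B replaces A's inner summation loop over all next jump distances by a binary
-- include/exclude recurrence on the largest allowed jump (faster); both ports
-- keep their Python's memo dict, threaded explicitly (as a hash map).


-- ===== PORT A =====
-- A's nested 'ways(jump, position, last)' with its memo dict threaded through
-- (the dict is only ever read/written by key, so it is carried as a hash map).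
def solutionWays (n : Int) (k : Int) (jump : Int) (position : Int) (last : Int)
    (memo : Std.HashMap (Int × Int × Int) Int) :
    Int × Std.HashMap (Int × Int × Int) Int :=
  if jump = k then ((if position = n then 1 else 0), memo)
  else if position > n then (0, memo)
  else
    match memo[(jump, position, last)]? with
    | some v => (v, memo)
    | none =>
      let r := (PySem.List.pyRange 1 last 1).attach.foldl
        (fun tm d =>
          let vm := solutionWays n k (jump + 1) (position + d.1) d.1 tm.2
          ((tm.1 + vm.1) % 1000000007, vm.2)) (0, memo)
      (r.1, r.2.insert (jump, position, last) r.1)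
termination_by (n + 1 - position).toNat
decreasing_by
  have hd : 1 ≤ d.1 ∧ d.1 < last := (PySem.List.mem_pyRange_one).1 d.2
  simp only [not_lt] at *
  omega

def solution (n : Int) (k : Int) : Int :=
  (solutionWays n k 0 0 (n + 1) ∅).1

-- ===== PORT B =====
-- Source B's 'q(r, m, l)' with its memo dict threaded through, same convention.
def solutionQ (r : Int) (m : Int) (l : Int)
    (memo : Std.HashMap (Int × Int × Int) Int) :
    Int × Std.HashMap (Int × Int × Int) Int :=
  if r = 0 then ((if m = 0 then 1 else 0), memo)
  else if m < 0 then (0, memo)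
  else if l ≤ 1 then (0, memo)
  else
    match memo[(r, m, l)]? with
    | some v => (v, memo)
    | none =>
      let a := solutionQ r m (l - 1) memo
      let b := solutionQ (r - 1) (m - (l - 1)) (l - 1) a.2
      let v := (a.1 + b.1) % 1000000007
      (v, b.2.insert (r, m, l) v)
termination_by ((m + 1).toNat, l.toNat)
decreasing_by
  · exact Prod.Lex.right _ (by omega)
  · exact Prod.Lex.left _ _ (by omega)

def solution_alt (n : Int) (k : Int) : Int :=
  (solutionQ k n (n + 1) ∅).1

-- ===== PRECONDITION & SPEC =====
def Spec_solution (n : Int) (k : Int) (out : Int) : Prop := out = solution_alt n k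
instance (n : Int) (k : Int) (out : Int) : Decidable (Spec_solution n k out) := by unfold Spec_solution; infer_instance

-- ===== CLAIM (what is proved, stated in full; the proofs are below) =====
def Claim_equal_solution : Prop := ∀ (n : Int) (k : Int), Dom_solution n k → Spec_solution n k (solution n k)

-- ===== LEMMAS AND PROOFS =====

-- Memo-free value of A's recursion (proof helper).
def waysPure (n : Int) (k : Int) (jump : Int) (position : Int) (last : Int) : Int :=
  if jump = k then (if position = n then 1 else 0)
  else if position > n then 0
  else
    (PySem.List.pyRange 1 last 1).attach.foldl
      (fun total d =>
        (total + waysPure n k (jump + 1) (position + d.1) d.1) % 1000000007) 0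
termination_by (n + 1 - position).toNat
decreasing_by
  have hd : 1 ≤ d.1 ∧ d.1 < last := (PySem.List.mem_pyRange_one).1 d.2
  simp only [not_lt] at *
  omega

-- Memo-free value of B's recursion (proof helper).
def qPure (r : Int) (m : Int) (l : Int) : Int :=
  if r = 0 then (if m = 0 then 1 else 0)
  else if m < 0 then 0
  else if l ≤ 1 then 0
  else (qPure r m (l - 1) + qPure (r - 1) (m - (l - 1)) (l - 1)) % 1000000007
termination_by ((m + 1).toNat, l.toNat)
decreasing_by
  · exact Prod.Lex.right _ (by omega)
  · exact Prod.Lex.left _ _ (by omega)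

-- A memo is good when every stored value is the memo-free value at its key.
def GoodA (n : Int) (k : Int) (memo : Std.HashMap (Int × Int × Int) Int) : Prop :=
  ∀ (j p l v : Int), memo[(j, p, l)]? = some v → v = waysPure n k j p l

def GoodB (memo : Std.HashMap (Int × Int × Int) Int) : Prop :=
  ∀ (r m l v : Int), memo[(r, m, l)]? = some v → v = qPure r m l

-- A's memoized recursion computes the memo-free value and preserves GoodA.
theorem waysMemo_correct (n k : Int) :
    ∀ (fuel : Nat) (jump position last : Int)
      (memo : Std.HashMap (Int × Int × Int) Int),
      (n + 1 - position).toNat ≤ fuel → GoodA n k memo →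
      (solutionWays n k jump position last memo).1 = waysPure n k jump position last ∧
      GoodA n k (solutionWays n k jump position last memo).2 := by
  intro fuel
  induction fuel with
  | zero =>
    intro jump position last memo hf hg
    rw [solutionWays, waysPure]
    by_cases hj : jump = k
    · simp [hj, hg]
    · have hpos : position > n := by omega
      simp [hj, hpos, hg]
  | succ f ih =>
    intro jump position last memo hf hg
    rw [solutionWays, waysPure]
    by_cases hj : jump = k
    · simp [hj, hg]
    · by_cases hpos : position > n
      · simp [hj, hpos, hg]
      · simp only [if_neg hj, if_neg hpos]
        cases hlook : memo[(jump, position, last)]? with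
        | some v =>
          refine ⟨?_, ?_⟩
          · have hv := hg jump position last v hlook
            -- the cached value is the pure value of the same loop
            rw [hv, waysPure, if_neg hj, if_neg hpos]
          · exact hg
        | none =>
          -- the loop: prove a fold invariant by induction on the iteration list
          have fold_ok : ∀ (L : List {x // x ∈ PySem.List.pyRange 1 last 1})
              (t0 : Int) (m0 : Std.HashMap (Int × Int × Int) Int), GoodA n k m0 →
              (L.foldl (fun tm d =>
                  let vm := solutionWays n k (jump + 1) (position + d.1) d.1 tm.2
                  ((tm.1 + vm.1) % 1000000007, vm.2)) (t0, m0)).1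
                = L.foldl (fun total d =>
                    (total + waysPure n k (jump + 1) (position + d.1) d.1) % 1000000007) t0 ∧
              GoodA n k (L.foldl (fun tm d =>
                  let vm := solutionWays n k (jump + 1) (position + d.1) d.1 tm.2
                  ((tm.1 + vm.1) % 1000000007, vm.2)) (t0, m0)).2 := by
            intro L
            induction L with
            | nil => intro t0 m0 hg0; exact ⟨rfl, hg0⟩
            | cons d L ihL =>
              intro t0 m0 hg0
              have hd : 1 ≤ d.1 ∧ d.1 < last := (PySem.List.mem_pyRange_one).1 d.2
              have hstep := ih (jump + 1) (position + d.1) d.1 m0 (by omega) hg0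
              simp only [List.foldl_cons]
              rw [hstep.1]
              exact ihL _ _ hstep.2
          have h := fold_ok ((PySem.List.pyRange 1 last 1).attach) 0 memo hg
          refine ⟨h.1, ?_⟩
          -- GoodA survives inserting the freshly computed (pure) value
          intro j p l v hv
          rw [Std.HashMap.getElem?_insert] at hv
          by_cases hkey : (jump, position, last) = (j, p, l)
          · rw [if_pos (beq_iff_eq.mpr hkey)] at hv
            cases hv
            have he : jump = j ∧ position = p ∧ last = l := by
              simpa [Prod.ext_iff] using hkey
            obtain ⟨he1, he2, he3⟩ := he
            subst he1; subst he2; subst he3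
            rw [h.1, waysPure, if_neg hj, if_neg hpos]
          · rw [if_neg (by simpa using hkey)] at hv
            exact h.2 j p l v hv
  -- end

-- B's memoized recursion computes the memo-free value and preserves GoodB.
theorem qMemo_correct :
    ∀ (fuel : Nat) (r m l : Int) (memo : Std.HashMap (Int × Int × Int) Int),
      (m + 1).toNat + l.toNat ≤ fuel → GoodB memo →
      (solutionQ r m l memo).1 = qPure r m l ∧ GoodB (solutionQ r m l memo).2 := by
  intro fuel
  induction fuel with
  | zero =>
    intro r m l memo hf hg
    rw [solutionQ, qPure]
    by_cases hr : r = 0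
    · simp [hr, hg]
    · have hm : m < 0 := by omega
      simp [hr, hm, hg]
  | succ f ih =>
    intro r m l memo hf hg
    rw [solutionQ, qPure]
    by_cases hr : r = 0
    · simp [hr, hg]
    · by_cases hm : m < 0
      · simp [hr, hm, hg]
      · by_cases hl : l ≤ 1
        · simp [hr, hm, hl, hg]
        · simp only [if_neg hr, if_neg hm, if_neg hl]
          cases hlook : memo[(r, m, l)]? with
          | some v =>
            refine ⟨?_, ?_⟩
            · have hv := hg r m l v hlook
              rw [hv, qPure, if_neg hr, if_neg hm, if_neg hl]
            · exact hg
          | none =>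
            have h1 := ih r m (l - 1) memo (by omega) hg
            have h2 := ih (r - 1) (m - (l - 1)) (l - 1)
              (solutionQ r m (l - 1) memo).2 (by omega) h1.2
            refine ⟨by rw [h1.1, h2.1], ?_⟩
            intro r' m' l' v hv
            rw [Std.HashMap.getElem?_insert] at hv
            by_cases hkey : (r, m, l) = (r', m', l')
            · rw [if_pos (beq_iff_eq.mpr hkey)] at hv
              cases hv
              have he : r = r' ∧ m = m' ∧ l = l' := by
                simpa [Prod.ext_iff] using hkey
              obtain ⟨he1, he2, he3⟩ := he
              subst he1; subst he2; subst he3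
              rw [h1.1, h2.1]
              conv_rhs => rw [qPure]
              rw [if_neg hr, if_neg hm, if_neg hl]
            · rw [if_neg (by simpa using hkey)] at hv
              exact h2.2 r' m' l' v hv

-- Unrolling qPure on its third argument reproduces A's left-to-right mod-fold.
theorem q_fold (r m : Int) (hr : r ≠ 0) (hm : ¬ m < 0) :
    ∀ (l : Int),
      (PySem.List.pyRange 1 l 1).foldl
        (fun total d => (total + qPure (r - 1) (m - d) d) % 1000000007) 0
      = qPure r m l := by
  have base : ∀ l : Int, l ≤ 1 →
      (PySem.List.pyRange 1 l 1).foldl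
        (fun total d => (total + qPure (r - 1) (m - d) d) % 1000000007) 0
      = qPure r m l := by
    intro l hl
    rw [PySem.List.pyRange_one_eq_nil hl, qPure]
    simp [hr, hm, hl]
  intro l
  by_cases hl : l ≤ 1
  · exact base l hl
  · have h1 : (1:Int) ≤ l := by omega
    induction l, h1 using Int.le_induction with
    | base => exact base 1 le_rfl
    | succ l hl' ih =>
      have step : (PySem.List.pyRange 1 l 1).foldl
          (fun total d => (total + qPure (r - 1) (m - d) d) % 1000000007) 0
          = qPure r m l := by
        by_cases hl1 : l ≤ 1
        · exact base l hl1
        · exact ih hl1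
      rw [PySem.List.pyRange_one_succ_right (by omega : (1:Int) ≤ l),
          List.foldl_append, step]
      conv_rhs => rw [qPure]
      rw [if_neg hr, if_neg hm, if_neg (show ¬ l + 1 ≤ 1 by omega)]
      simp [List.foldl]

-- The two memo-free recursions agree.
theorem ways_eq_q (n k : Int) :
    ∀ (fuel : Nat) (jump position last : Int),
      (n + 1 - position).toNat ≤ fuel →
      waysPure n k jump position last = qPure (k - jump) (n - position) last := by
  intro fuel
  induction fuel with
  | zero =>
    intro jump position last hf
    rw [waysPure, qPure]
    by_cases hj : jump = k
    · rw [if_pos hj, if_pos (show k - jump = 0 by omega)]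
      split_ifs <;> omega
    · rw [if_neg hj, if_pos (show position > n by omega),
          if_neg (show ¬ (k - jump = 0) by omega),
          if_pos (show n - position < 0 by omega)]
  | succ f ih =>
    intro jump position last hf
    rw [waysPure]
    by_cases hj : jump = k
    · rw [if_pos hj, qPure, if_pos (show k - jump = 0 by omega)]
      split_ifs <;> omega
    · by_cases hpos : position > n
      · rw [if_neg hj, if_pos hpos, qPure,
            if_neg (show ¬ (k - jump = 0) by omega),
            if_pos (show n - position < 0 by omega)]
      · simp only [if_neg hj, if_neg hpos]
        have hr : k - jump ≠ 0 := by omega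
        have hm : ¬ (n - position) < 0 := by omega
        rw [← q_fold (k - jump) (n - position) hr hm last]
        rw [List.foldl_attach
          (f := fun total d => (total + waysPure n k (jump + 1) (position + d) d) % 1000000007)]
        apply List.foldl_ext
        intro total d hd
        have hd1 : 1 ≤ d ∧ d < last := (PySem.List.mem_pyRange_one).1 hd
        rw [ih (jump + 1) (position + d) d (by omega),
            show k - (jump + 1) = k - jump - 1 from by ring,
            show n - (position + d) = n - position - d from by ring]

theorem goodA_empty (n k : Int) : GoodA n k ∅ := by
  intro j p l v hv
  simp at hv

theorem goodB_empty : GoodB ∅ := by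
  intro r m l v hv
  simp at hv

-- ===== VERDICT (by name: the statement is the Claim_ definition above) =====
theorem solution_spec : Claim_equal_solution := by
  intro n k _
  unfold Spec_solution solution solution_alt
  rw [(waysMemo_correct n k (n + 1 - 0).toNat 0 0 (n + 1) ∅ le_rfl (goodA_empty n k)).1,
      (qMemo_correct ((n + 1).toNat + (n + 1).toNat) k n (n + 1) ∅ le_rfl goodB_empty).1,
      ways_eq_q n k (n + 1 - 0).toNat 0 0 (n + 1) le_rfl]
  norm_num
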